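-- pv_equiv track=rewrite | github.com/DVampire/LeetCodePro | 3630.partition-array-for-maximum-xor-and-and.py | maximizeXorAndXor
-- ===== SOURCE A (Python) =====
-- from typing import List
--
-- def maximizeXorAndXor(nums: List[int]) -> int:
--     n = len(nums)
--     BITS = 30
--     ALL_BITS = (1 << BITS) - 1
--
--     # Precompute XOR for each subset
--     xor_all = [0] * (1 << n)
--     for mask in range(1, 1 << n):
--         lsb = mask & (-mask)
--         idx = lsb.bit_length() - 1
--         xor_all[mask] = xor_all[mask ^ lsb] ^ nums[idx]
--
--     # Precompute AND for each subset (AND of empty set is 0)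
--     and_all = [0] * (1 << n)
--     for mask in range(1, 1 << n):
--         lsb = mask & (-mask)
--         idx = lsb.bit_length() - 1
--         if mask == lsb:
--             and_all[mask] = nums[idx]
--         else:
--             and_all[mask] = and_all[mask ^ lsb] & nums[idx]
--
--     # Precompute basis for each subset (for XOR linear space)
--     basis_all = [[] for _ in range(1 << n)]
--     for mask in range(1, 1 << n):
--         lsb = mask & (-mask)
--         idx = lsb.bit_length() - 1
--         prev_basis = basis_all[mask ^ lsb][:]
--         cur = nums[idx]
--         for b in prev_basis:
--             cur = min(cur, cur ^ b)
--         if cur > 0: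
--             prev_basis.append(cur)
--             prev_basis.sort(reverse=True)
--         basis_all[mask] = prev_basis
--
--     def max_xor_sum(s_mask):
--         if s_mask == 0:
--             return 0
--
--         c = xor_all[s_mask]
--         # We want to maximize x + (c XOR x) = c + 2*(x AND ~c)
--         target = ALL_BITS ^ c  # bits where c is 0
--         basis = basis_all[s_mask]
--
--         # Greedy: find x in span that maximizes x AND target
--         x = 0
--         for b in basis:
--             if (x ^ b) & target > x & target:
--                 x ^= b
--
--         return c + 2 * (x & target)
--
--     max_value = 0
--     full_mask = (1 << n) - 1
--
--     for b_mask in range(1 << n):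
--         and_b = and_all[b_mask]
--         s_mask = full_mask ^ b_mask
--         xor_sum = max_xor_sum(s_mask)
--         max_value = max(max_value, and_b + xor_sum)
--
--     return max_value
-- ===== SOURCE B (Python) =====
-- from typing import List
--
--
-- def _elems(nums, m):
--     # values of nums at the set bits of m, lowest bit first
--     out = []
--     while m:
--         lsb = m & -m
--         out.append(nums[lsb.bit_length() - 1])
--         m ^= lsb
--     return out
--
--
-- def maximizeXorAndXor(nums: List[int]) -> int:
--     n = len(nums)
--     ALL_BITS = (1 << 30) - 1
--     full = (1 << n) - 1
--     best = 0
--     for b_mask in range(1 << n):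
--         # AND of the b-partition, highest set bit first (0 for the empty partition)
--         bvals = _elems(nums, b_mask)[::-1]
--         and_b = 0
--         if bvals:
--             and_b = bvals[0]
--             for v in bvals[1:]:
--                 and_b &= v
--         s = full ^ b_mask
--         if s == 0:
--             xor_sum = 0
--         else:
--             svals = _elems(nums, s)[::-1]
--             c = 0
--             for v in svals:
--                 c ^= v
--             # build a fresh linear basis from the values, highest set bit first
--             basis = []
--             for v in svals:
--                 cur = v
--                 for b in basis:
--                     cur = min(cur, cur ^ b)
--                 if cur > 0:
--                     basis.append(cur)
--                     basis.sort(reverse=True)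
--             # greedily maximize x & target over the span of the basis
--             target = ALL_BITS ^ c
--             x = 0
--             for b in basis:
--                 if (x ^ b) & target > x & target:
--                     x ^= b
--             xor_sum = c + 2 * (x & target)
--         best = max(best, and_b + xor_sum)
--     return best
-- ===== Notes on version B (the rewrite author's own statement) =====
-- stated objective: simpler
-- what changed: B drops A's three 2^n-entry subset-DP tables (XOR, AND, basis) and instead, for each b_mask, recomputes the AND, the XOR and the linear basis directly from the elements at the set bits of the mask (highest bit first, matching A's insertion order), keeping only O(n) extra memory.
import Mathlib
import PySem

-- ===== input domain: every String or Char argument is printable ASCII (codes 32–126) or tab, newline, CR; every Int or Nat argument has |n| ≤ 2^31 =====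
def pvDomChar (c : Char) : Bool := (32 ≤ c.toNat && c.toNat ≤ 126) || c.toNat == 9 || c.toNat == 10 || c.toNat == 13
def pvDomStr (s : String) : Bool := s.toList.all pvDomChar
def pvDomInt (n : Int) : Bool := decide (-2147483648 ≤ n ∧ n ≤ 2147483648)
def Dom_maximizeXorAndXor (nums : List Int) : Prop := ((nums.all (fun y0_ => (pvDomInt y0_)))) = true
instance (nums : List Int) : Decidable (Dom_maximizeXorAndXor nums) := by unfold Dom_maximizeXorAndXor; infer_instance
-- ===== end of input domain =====

-- B replaces A's three 2^n-sized subset-DP tables by a direct per-mask recomputation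
-- of the AND, the XOR and the linear basis (same value; objective: simpler structure,
-- constant extra memory instead of the tables).

-- ===== shared low-level helpers (these same Python lines occur in both programs) =====

-- Python's  m & -m  for a Nat mask (exact: the result is ≥ 0 for m ≥ 0)
def lsbN (m : Nat) : Nat := (PySem.Int.band (m : Int) (-(m : Int))).toNat

-- bit facts the ports need for termination (cited by name in decreasing_by)
theorem and_bits (i j : Bool) (a b : Nat) :
    (Nat.bit i a) &&& (Nat.bit j b) = Nat.bit (i && j) (a &&& b) := by
  simp [HAnd.hAnd, AndOp.and, Nat.land]

theorem xor_bits (i j : Bool) (a b : Nat) :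
    (Nat.bit i a) ^^^ (Nat.bit j b) = Nat.bit (Bool.xor i j) (a ^^^ b) := by
  simp [HXor.hXor, XorOp.xor, Nat.xor]

-- m & (m-1) clears exactly the lowest set bit:  it is < m and m ^ (m - (m & (m-1))) recovers it
theorem lowb_core (m : Nat) : 0 < m →
    (m &&& (m-1)) < m ∧ m ^^^ (m - (m &&& (m-1))) = m &&& (m-1) := by
  induction m using Nat.strong_induction_on with
  | _ m IH =>
    intro hm
    rcases Nat.mod_two_eq_zero_or_one m with hp | hp
    · -- even: m = 2*a, 0 < a
      set a := m / 2 with ha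
      have hapos : 0 < a := by omega
      have hbit : m = Nat.bit false a := by simp [Nat.bit_val]; omega
      have hbit1 : m - 1 = Nat.bit true (a - 1) := by simp [Nat.bit_val]; omega
      have IHa := IH a (by omega) hapos
      have hle : a &&& (a - 1) ≤ a := Nat.and_le_left
      have hand : m &&& (m - 1) = 2 * (a &&& (a - 1)) := by
        rw [hbit1, hbit, and_bits]; simp [Nat.bit_val]
      refine ⟨by omega, ?_⟩
      have hsub : m - (m &&& (m - 1)) = Nat.bit false (a - (a &&& (a - 1))) := by
        rw [hand]; simp [Nat.bit_val]; omega
      rw [hsub, hand]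
      conv_lhs => rw [hbit]
      rw [xor_bits]
      simp [Nat.bit_val]
      omega
    · -- odd: m = 2*a+1, lowest bit is 1
      set a := m / 2 with ha
      have hbit : m = Nat.bit true a := by simp [Nat.bit_val]; omega
      have hbit1 : m - 1 = Nat.bit false a := by simp [Nat.bit_val]; omega
      have hand : m &&& (m - 1) = 2 * a := by
        rw [hbit1, hbit, and_bits]; simp [Nat.bit_val]
      refine ⟨by omega, ?_⟩
      have hsub : m - (m &&& (m - 1)) = Nat.bit true 0 := by
        rw [hand]; simp [Nat.bit_val]; omega
      rw [hsub, hand]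
      conv_lhs => rw [hbit]
      rw [xor_bits]
      simp [Nat.bit_val]

theorem lsbN_eq (m : Nat) (h : 0 < m) : lsbN m = m - (m &&& (m-1)) := by
  unfold lsbN PySem.Int.band
  have h1 : ¬ ((0:Int) ≤ -(m:Int)) := by omega
  simp only [Int.natCast_nonneg, if_pos, h1, if_false]
  have h2 : (-(-(m:Int)) - 1).toNat = m - 1 := by omega
  have h3 : ((m:Int)).toNat = m := by omega
  rw [h2, h3]
  omega

theorem xor_lsbN_lt (m : Nat) (h : 0 < m) : m ^^^ lsbN m < m := by
  rw [lsbN_eq m h]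
  have hc := lowb_core m h
  rw [hc.2]
  exact hc.1

-- nums[lsb.bit_length() - 1]  (the element at the lowest set bit of m)
def lowVal (nums : List Int) (m : Nat) : Int :=
  PySem.List.pyGetD nums ((PySem.Int.bitLength (lsbN m : Int) : Int) - 1) 0

-- the insertion step both Pythons perform on the linear basis:
-- cur = v; for b in basis: cur = min(cur, cur ^ b); if cur > 0: append and sort(reverse=True)
def basisInsert (basis : List Int) (v : Int) : List Int :=
  let cur := basis.foldl (fun c b => min c (PySem.Int.bxor c b)) v
  if 0 < cur then PySem.List.sorted (basis ++ [cur]) (fun x => x) true else basis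

-- the shared greedy: x = 0; for b in basis: if (x ^ b) & target > x & target: x ^= b
def greedyX (basis : List Int) (target : Int) : Int :=
  basis.foldl (fun x b =>
    if PySem.Int.band x target < PySem.Int.band (PySem.Int.bxor x b) target
    then PySem.Int.bxor x b else x) 0

-- ===== PORT A =====
def maximizeXorAndXor (nums : List Int) : Int :=
  let n := nums.length
  let allBits : Int := (1 <<< 30) - 1
  let size := 1 <<< n
  let xorAll : Array Int :=
    (List.range' 1 (size - 1)).foldl
      (fun arr mask =>
        arr.setIfInBounds mask
          (PySem.Int.bxor (arr.getD (mask ^^^ lsbN mask) 0) (lowVal nums mask)))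
      (Array.replicate size 0)
  let andAll : Array Int :=
    (List.range' 1 (size - 1)).foldl
      (fun arr mask =>
        arr.setIfInBounds mask
          (if mask = lsbN mask then lowVal nums mask
           else PySem.Int.band (arr.getD (mask ^^^ lsbN mask) 0) (lowVal nums mask)))
      (Array.replicate size 0)
  let basisAll : Array (List Int) :=
    (List.range' 1 (size - 1)).foldl
      (fun arr mask =>
        arr.setIfInBounds mask
          (basisInsert (arr.getD (mask ^^^ lsbN mask) []) (lowVal nums mask)))
      (Array.replicate size ([] : List Int))
  let maxXorSum : Nat → Int := fun s =>
    if s = 0 then 0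
    else
      let c := xorAll.getD s 0
      let target := PySem.Int.bxor allBits c
      let x := greedyX (basisAll.getD s []) target
      c + 2 * PySem.Int.band x target
  let full := (1 <<< n) - 1
  (List.range size).foldl
    (fun best mask => max best (andAll.getD mask 0 + maxXorSum (full ^^^ mask))) 0

-- ===== PORT B =====
-- _elems: the while-loop peeling the lowest set bit, collecting nums[idx]
def elemsOfMask (nums : List Int) (m : Nat) : List Int :=
  if _h : m = 0 then []
  else lowVal nums m :: elemsOfMask nums (m ^^^ lsbN m)
termination_by m
decreasing_by exact xor_lsbN_lt m (Nat.pos_of_ne_zero _h)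

def maximizeXorAndXor_alt (nums : List Int) : Int :=
  let n := nums.length
  let allBits : Int := (1 <<< 30) - 1
  let full := (1 <<< n) - 1
  (List.range (1 <<< n)).foldl
    (fun best bMask =>
      let bvals := (elemsOfMask nums bMask).reverse
      let andB : Int := match bvals with
        | [] => 0
        | v :: rest => rest.foldl PySem.Int.band v
      let s := full ^^^ bMask
      let xorSum : Int :=
        if s = 0 then 0
        else
          let svals := (elemsOfMask nums s).reverse
          let c := svals.foldl PySem.Int.bxor 0
          let basis := svals.foldl basisInsert []
          let target := PySem.Int.bxor allBits c
          let x := greedyX basis target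
          c + 2 * PySem.Int.band x target
      max best (andB + xorSum)) 0

-- ===== PRECONDITION & SPEC =====
def Spec_maximizeXorAndXor (nums : List Int) (out : Int) : Prop := out = maximizeXorAndXor_alt nums
instance (nums : List Int) (out : Int) : Decidable (Spec_maximizeXorAndXor nums out) := by unfold Spec_maximizeXorAndXor; infer_instance

-- ===== CLAIM (what is proved, stated in full; the proofs are below) =====
def Claim_equal_maximizeXorAndXor : Prop := ∀ (nums : List Int), Dom_maximizeXorAndXor nums → Spec_maximizeXorAndXor nums (maximizeXorAndXor nums)

-- ===== LEMMAS AND PROOFS =====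

-- the lsb-peeling value of each of A's DP tables, as a recursion on the mask
def xS (nums : List Int) (m : Nat) : Int :=
  if m = 0 then 0
  else PySem.Int.bxor (xS nums (m ^^^ lsbN m)) (lowVal nums m)
termination_by m
decreasing_by exact xor_lsbN_lt m (by omega)

def aS (nums : List Int) (m : Nat) : Int :=
  if m = 0 then 0
  else if m = lsbN m then lowVal nums m
  else PySem.Int.band (aS nums (m ^^^ lsbN m)) (lowVal nums m)
termination_by m
decreasing_by exact xor_lsbN_lt m (by omega)

def bS (nums : List Int) (m : Nat) : List Int :=
  if m = 0 then []
  else basisInsert (bS nums (m ^^^ lsbN m)) (lowVal nums m)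
termination_by m
decreasing_by exact xor_lsbN_lt m (by omega)

-- A's table-filling loop computes the lsb-peeling spec at every already-visited index
theorem table_aux {α : Type} (size : Nat) (d : α) (g : α → Nat → α) (spec : Nat → α)
    (h0 : spec 0 = d)
    (hs : ∀ m, 0 < m → spec m = g (spec (m ^^^ lsbN m)) m) :
    ∀ j, j ≤ size - 1 →
      (((List.range' 1 j).foldl
        (fun arr mask => arr.setIfInBounds mask (g (arr.getD (mask ^^^ lsbN mask) d) mask))
        (Array.replicate size d)).size = size ∧
      ∀ m, m < size →
      ((List.range' 1 j).foldl
        (fun arr mask => arr.setIfInBounds mask (g (arr.getD (mask ^^^ lsbN mask) d) mask))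
        (Array.replicate size d)).getD m d
      = if m ≤ j then spec m else d) := by
  intro j
  induction j with
  | zero =>
    intro _
    refine ⟨by simp, ?_⟩
    intro m hm
    simp only [List.range'_zero, List.foldl_nil, Array.getD_eq_getD_getElem?,
      Array.getElem?_replicate, hm, if_pos]
    rcases Nat.eq_zero_or_pos m with rfl | hmp
    · simp [h0]
    · simp [Nat.not_le.mpr hmp, Option.getD]
  | succ j IH =>
    intro hj
    have hj' : j ≤ size - 1 := by omega
    obtain ⟨hsize, hIH⟩ := IH hj'
    have hlt : 1 + j < size := by omega
    rw [List.range'_concat]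
    simp only [List.foldl_append, List.foldl_cons, List.foldl_nil, Nat.one_mul]
    set F := (List.range' 1 j).foldl
        (fun arr mask => arr.setIfInBounds mask (g (arr.getD (mask ^^^ lsbN mask) d) mask))
        (Array.replicate size d) with hF
    have hxlt : (1 + j) ^^^ lsbN (1 + j) < 1 + j := xor_lsbN_lt _ (by omega)
    have hval : F.getD ((1 + j) ^^^ lsbN (1 + j)) d = spec ((1 + j) ^^^ lsbN (1 + j)) := by
      rw [hIH _ (by omega)]
      simp [Nat.le_of_lt_succ (by omega : (1 + j) ^^^ lsbN (1 + j) < j + 1)]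
    refine ⟨by simp [hsize], ?_⟩
    intro m hm
    rw [Array.getD_eq_getD_getElem?, Array.getElem?_setIfInBounds, hsize]
    by_cases hmj : 1 + j = m
    · rw [if_pos hmj, if_pos hlt]
      subst hmj
      simp only [Option.getD_some]
      rw [hval, ← hs _ (by omega), if_pos (by omega : 1 + j ≤ j + 1)]
    · rw [if_neg hmj, ← Array.getD_eq_getD_getElem?, hIH m hm]
      by_cases hmle : m ≤ j
      · rw [if_pos hmle, if_pos (by omega : m ≤ j + 1)]
      · rw [if_neg hmle, if_neg (by omega : ¬ m ≤ j + 1)]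

theorem xor_full_lt (n mask : Nat) (h : mask < 1 <<< n) :
    ((1 <<< n) - 1) ^^^ mask < 1 <<< n := by
  rw [Nat.one_shiftLeft] at h ⊢
  exact Nat.xor_lt_two_pow (by omega) h

theorem elems_pos (nums : List Int) (m : Nat) (h : m ≠ 0) :
    elemsOfMask nums m = lowVal nums m :: elemsOfMask nums (m ^^^ lsbN m) := by
  rw [elemsOfMask]; simp [h]

theorem xS_eq (nums : List Int) (m : Nat) :
    xS nums m = (elemsOfMask nums m).reverse.foldl PySem.Int.bxor 0 := by
  induction m using Nat.strong_induction_on with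
  | _ m IH =>
    by_cases h : m = 0
    · subst h; rw [xS, elemsOfMask]; simp
    · rw [xS, if_neg h, elems_pos nums m h]
      simp only [List.reverse_cons, List.foldl_append, List.foldl_cons, List.foldl_nil]
      rw [IH _ (xor_lsbN_lt m (Nat.pos_of_ne_zero h))]

theorem bS_eq (nums : List Int) (m : Nat) :
    bS nums m = (elemsOfMask nums m).reverse.foldl basisInsert [] := by
  induction m using Nat.strong_induction_on with
  | _ m IH =>
    by_cases h : m = 0
    · subst h; rw [bS, elemsOfMask]; simp
    · rw [bS, if_neg h, elems_pos nums m h]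
      simp only [List.reverse_cons, List.foldl_append, List.foldl_cons, List.foldl_nil]
      rw [IH _ (xor_lsbN_lt m (Nat.pos_of_ne_zero h))]

theorem aS_eq (nums : List Int) (m : Nat) :
    aS nums m = (match (elemsOfMask nums m).reverse with
      | [] => (0 : Int)
      | v :: rest => rest.foldl PySem.Int.band v) := by
  induction m using Nat.strong_induction_on with
  | _ m IH =>
    by_cases h : m = 0
    · subst h; rw [aS, elemsOfMask]; simp
    · rw [aS, if_neg h, elems_pos nums m h]
      by_cases hl : m = lsbN m
      · have hz : m ^^^ lsbN m = 0 := by rw [← hl]; exact Nat.xor_self m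
        rw [if_pos hl, hz, elemsOfMask]
        simp
      · have hz : m ^^^ lsbN m ≠ 0 := by
          intro hc; exact hl (Nat.xor_eq_zero_iff.mp hc)
        rw [if_neg hl, IH _ (xor_lsbN_lt m (Nat.pos_of_ne_zero h))]
        rw [elems_pos nums _ hz]
        simp only [List.reverse_cons]
        obtain ⟨hh, ht, hE⟩ : ∃ hh ht,
            (elemsOfMask nums ((m ^^^ lsbN m) ^^^ lsbN (m ^^^ lsbN m))).reverse
              ++ [lowVal nums (m ^^^ lsbN m)] = hh :: ht := by
          rcases (elemsOfMask nums ((m ^^^ lsbN m) ^^^ lsbN (m ^^^ lsbN m))).reverse with _ | ⟨x, xs⟩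
          · exact ⟨_, _, rfl⟩
          · exact ⟨_, _, rfl⟩
        rw [hE]
        simp only [List.cons_append, List.foldl_append, List.foldl_cons, List.foldl_nil]

-- ===== VERDICT (by name: the statement is the Claim_ definition above) =====
theorem maximizeXorAndXor_spec : Claim_equal_maximizeXorAndXor := by
  intro nums _
  unfold Spec_maximizeXorAndXor
  simp only [maximizeXorAndXor, maximizeXorAndXor_alt]
  apply PySem.List.foldl_congr_mem
  intro acc mask hmem
  rw [List.mem_range] at hmem
  have hszpos : 0 < (1 : Nat) <<< nums.length := by
    rw [Nat.one_shiftLeft]; positivity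
  -- the three tables compute the lsb-peeling specs
  have hAnd := (table_aux ((1:Nat) <<< nums.length) 0
      (fun prev mask => if mask = lsbN mask then lowVal nums mask
        else PySem.Int.band prev (lowVal nums mask)) (aS nums)
      (by rw [aS]; simp)
      (fun m hm => by rw [aS, if_neg (by omega)])
      ((1 <<< nums.length) - 1) (le_refl _)).2
  have hXor := (table_aux ((1:Nat) <<< nums.length) 0
      (fun prev mask => PySem.Int.bxor prev (lowVal nums mask)) (xS nums)
      (by rw [xS]; simp)
      (fun m hm => by rw [xS, if_neg (by omega)])
      ((1 <<< nums.length) - 1) (le_refl _)).2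
  have hBasis := (table_aux ((1:Nat) <<< nums.length) ([] : List Int)
      (fun prev mask => basisInsert prev (lowVal nums mask)) (bS nums)
      (by rw [bS]; simp)
      (fun m hm => by rw [bS, if_neg (by omega)])
      ((1 <<< nums.length) - 1) (le_refl _)).2
  have hs : ((1 <<< nums.length) - 1) ^^^ mask < 1 <<< nums.length :=
    xor_full_lt nums.length mask hmem
  rw [hAnd mask hmem, if_pos (by omega), aS_eq]
  by_cases hz : ((1 <<< nums.length) - 1) ^^^ mask = 0
  · rw [if_pos hz, if_pos hz]
  · rw [if_neg hz, if_neg hz]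
    rw [hXor _ hs, if_pos (by omega), xS_eq]
    rw [hBasis _ hs, if_pos (by omega), bS_eq]
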